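-- pv_equiv track=rewrite | github.com/N0kr0s/ML-Data-Lake | main.py | cooccurrence_score
-- ===== SOURCE A (Python) =====
-- from collections import defaultdict
--
-- def cooccurrence_score(linked_ents):
--     co_matrix = defaultdict(lambda: defaultdict(int))
--     for i in range(len(linked_ents)):
--         for j in range(i + 1, len(linked_ents)):
--             e1, e2 = linked_ents[i][1], linked_ents[j][1]
--             co_matrix[e1][e2] += 1
--             co_matrix[e2][e1] += 1
--     return dict(co_matrix)
-- ===== SOURCE B (Python) =====
-- def cooccurrence_score(linked_ents):
--     ents = [e for _, e in linked_ents]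
--     if len(ents) < 2:
--         return {}
--     counts = {}
--     for e in ents:
--         counts[e] = counts.get(e, 0) + 1
--     result = {}
--     for i, a in enumerate(ents):
--         if a in result:
--             continue
--         inner = {}
--         for b in ents[:i] + ents[i + 1:]:
--             if b not in inner:
--                 inner[b] = counts[a] * (counts[b] - (1 if b == a else 0))
--         result[a] = inner
--     return result
-- ===== Notes on version B (the rewrite author's own statement) =====
-- stated objective: alternative
-- what changed: Replaces A's all-pairs double loop of dict increments by one frequency count and a closed form: entry (a,b) is count(a)*count(b), diagonal count(a)*(count(a)-1), built once per distinct entity in first-occurrence order.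
import Mathlib
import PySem

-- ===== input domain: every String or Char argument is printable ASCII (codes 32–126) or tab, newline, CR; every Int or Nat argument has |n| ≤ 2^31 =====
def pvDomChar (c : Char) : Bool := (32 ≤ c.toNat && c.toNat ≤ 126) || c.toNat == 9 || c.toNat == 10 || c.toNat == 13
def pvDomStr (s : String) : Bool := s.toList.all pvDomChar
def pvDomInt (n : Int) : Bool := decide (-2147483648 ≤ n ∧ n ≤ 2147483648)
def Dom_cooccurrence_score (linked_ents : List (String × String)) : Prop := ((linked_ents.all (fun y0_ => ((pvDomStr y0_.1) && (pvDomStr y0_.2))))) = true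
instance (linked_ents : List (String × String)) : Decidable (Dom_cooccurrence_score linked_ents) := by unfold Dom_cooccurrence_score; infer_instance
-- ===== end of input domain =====

-- B replaces A's all-pairs double loop of dict increments by one frequency count and the
-- closed form count(a)*count(b) (diagonal count(a)*(count(a)-1)) per distinct pair of entities
-- (an alternative algorithm; no speed claim is made).

-- ===== PORT A =====
-- co_matrix[e1][e2] += 1 on a defaultdict(lambda: defaultdict(int))
def csBump (co : PySem.Dict String (PySem.Dict String Int)) (e1 e2 : String) :
    PySem.Dict String (PySem.Dict String Int) :=
  let m := co.getD e1 PySem.Dict.empty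
  co.insert e1 (m.insert e2 (m.getD e2 0 + 1))

def cooccurrence_score (linked_ents : List (String × String)) : List (String × List (String × Int)) :=
  let co := (PySem.List.pyRange 0 (PySem.List.len linked_ents) 1).foldl (fun co i =>
    (PySem.List.pyRange (i + 1) (PySem.List.len linked_ents) 1).foldl (fun co j =>
      let e1 := (PySem.List.pyGetD linked_ents i ("", "")).2
      let e2 := (PySem.List.pyGetD linked_ents j ("", "")).2
      csBump (csBump co e1 e2) e2 e1) co) PySem.Dict.empty
  co.items.map (fun p => (p.1, p.2.items))

-- ===== PORT B =====
def cooccurrence_score_alt (linked_ents : List (String × String)) : List (String × List (String × Int)) :=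
  let ents := linked_ents.map (fun p => p.2)
  if PySem.List.len ents < 2 then [] else
  let counts := ents.foldl (fun d e => d.insert e (d.getD e 0 + 1)) PySem.Dict.empty
  let result := (PySem.List.enumerate ents).foldl (fun r (p : Int × String) =>
    if r.contains p.2 then r else
    let inner := (PySem.List.slice ents none (some p.1) ++ PySem.List.slice ents (some (p.1 + 1)) none).foldl
      (fun inn b => if inn.contains b then inn
        else inn.insert b (counts.getD p.2 0 * (counts.getD b 0 - (if b == p.2 then 1 else 0))))
      PySem.Dict.empty
    r.insert p.2 inner) PySem.Dict.empty
  result.items.map (fun p => (p.1, p.2.items))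

-- ===== PRECONDITION & SPEC =====
def Spec_cooccurrence_score (linked_ents : List (String × String)) (out : List (String × List (String × Int))) : Prop := out = cooccurrence_score_alt linked_ents
instance (linked_ents : List (String × String)) (out : List (String × List (String × Int))) : Decidable (Spec_cooccurrence_score linked_ents out) := by unfold Spec_cooccurrence_score; infer_instance

-- ===== CLAIM (what is proved, stated in full; the proofs are below) =====
def Claim_equal_cooccurrence_score : Prop := ∀ (linked_ents : List (String × String)), Dom_cooccurrence_score linked_ents → Spec_cooccurrence_score linked_ents (cooccurrence_score linked_ents)

-- ===== LEMMAS AND PROOFS =====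

-- The flat list of "+= 1" instructions A performs: each unordered position pair (i < j)
-- with entities (e1, e2) contributes the two increments (e1,e2) and (e2,e1).
def csInstr : List String → List (String × String)
  | [] => []
  | e :: r => (r.flatMap fun x => [(e, x), (x, e)]) ++ csInstr r

def csApply (L : List (String × String)) (d : PySem.Dict String (PySem.Dict String Int)) :
    PySem.Dict String (PySem.Dict String Int) :=
  L.foldl (fun co p => csBump co p.1 p.2) d

-- a dict whose keys are a Nodup list S and whose value at k is f k
def csTab {ν : Type} (S : List String) (f : String → ν) : PySem.Dict String ν :=
  PySem.Dict.mk (S.map fun k => (k, f k))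

def csKeysO (L : List (String × String)) : List String :=
  PySem.Set.ofList (L.map Prod.fst)

def csKeysI (L : List (String × String)) (a : String) : List String :=
  PySem.Set.ofList ((L.filter (fun p => p.1 == a)).map Prod.snd)

-- structural view of A's nested index loops: fold over the tails of the list
def tailsFold {α β : Type} (σ : β → α → List α → β) : List α → β → β
  | [], s => s
  | y :: r, s => tailsFold σ r (σ s y r)

lemma cs_tab_items {ν : Type} (S : List String) (f : String → ν) :
    (csTab S f).items = S.map (fun k => (k, f k)) := rfl

lemma cs_tab_keys {ν : Type} (S : List String) (f : String → ν) :
    (csTab S f).keys = S := by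
  simp [csTab, PySem.Dict.keys, Function.comp_def]

lemma cs_tab_contains {ν : Type} (S : List String) (f : String → ν) (a : String) :
    (csTab S f).contains a = decide (a ∈ S) := by
  rw [PySem.Dict.contains_eq_decide_mem_keys, cs_tab_keys]

lemma cs_tab_getD {ν : Type} (S : List String) (f : String → ν) (a : String) (d0 : ν)
    (hS : S.Nodup) : (csTab S f).getD a d0 = if a ∈ S then f a else d0 := by
  by_cases h : a ∈ S
  · rw [if_pos h]
    refine PySem.Dict.getD_of_mem_items _ ?_ (by rw [cs_tab_keys]; exact hS) d0
    rw [cs_tab_items]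
    exact List.mem_map_of_mem h
  · rw [if_neg h]
    exact PySem.Dict.getD_of_not_contains _ d0 (by rw [cs_tab_contains]; simp [h])

lemma cs_tab_insert {ν : Type} (S : List String) (f f' : String → ν) (a : String) (v : ν)
    (hf : ∀ k ∈ S, k ≠ a → f k = f' k) (hv : v = f' a) :
    (csTab S f).insert a v = csTab (PySem.Set.add S a) f' := by
  by_cases h : a ∈ S
  · apply PySem.Dict.ext
    rw [PySem.Dict.items_insert_of_contains _ _ (by rw [cs_tab_contains]; simp [h])]
    rw [cs_tab_items, cs_tab_items, PySem.Set.add_of_mem h, List.map_map]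
    refine List.map_congr_left (fun k hk => ?_)
    simp only [Function.comp_apply]
    by_cases hka : k = a
    · subst hka; simp [hv]
    · simp [hka, hf k hk hka]
  · apply PySem.Dict.ext
    rw [PySem.Dict.items_insert_of_not_contains _ _ (by rw [cs_tab_contains]; simp [h])]
    rw [cs_tab_items, cs_tab_items, PySem.Set.add_of_not_mem h, List.map_append]
    simp only [List.map_cons, List.map_nil]
    rw [hv]
    congr 1
    refine List.map_congr_left (fun k hk => ?_)
    rw [hf k hk (fun hh => h (hh ▸ hk))]

lemma cs_keysO_append (L : List (String × String)) (a b : String) :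
    csKeysO (L ++ [(a, b)]) = PySem.Set.add (csKeysO L) a := by
  simp only [csKeysO, List.map_append, List.map_cons, List.map_nil]
  exact PySem.Set.ofList_append_singleton _ _

lemma cs_keysI_append (L : List (String × String)) (a b a' : String) :
    csKeysI (L ++ [(a, b)]) a' =
      if a' = a then PySem.Set.add (csKeysI L a) b else csKeysI L a' := by
  simp only [csKeysI, List.filter_append]
  by_cases h : a' = a
  · subst h
    simp only [List.filter_cons, List.filter_nil, beq_self_eq_true, if_true]
    simp only [List.map_append, List.map_cons, List.map_nil]
    exact PySem.Set.ofList_append_singleton _ _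
  · have hne : ((a, b).1 == a') = false := by
      simp only [beq_eq_false_iff_ne, ne_eq]
      exact fun hh => h hh.symm
    simp [hne, h]

lemma cs_keysI_nil_of_not_memO (L : List (String × String)) (a : String)
    (h : a ∉ csKeysO L) : csKeysI L a = [] := by
  have hm : a ∉ L.map Prod.fst := fun hm => h ((PySem.Set.mem_ofList _ _).2 hm)
  have hf : L.filter (fun p => p.1 == a) = [] := by
    rw [List.filter_eq_nil_iff]
    intro p hp hb
    exact hm (beq_iff_eq.1 hb ▸ List.mem_map_of_mem (f := Prod.fst) hp)
  simp [csKeysI, hf]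

lemma cs_count_zero_of_not_memI (L : List (String × String)) (a b : String)
    (h : b ∉ csKeysI L a) : L.count (a, b) = 0 := by
  rw [List.count_eq_zero]
  intro hm
  apply h
  apply (PySem.Set.mem_ofList _ _).2
  exact List.mem_map_of_mem (f := Prod.snd) (List.mem_filter.2 ⟨hm, by simp⟩)

lemma cs_apply_closed (L : List (String × String)) :
    csApply L PySem.Dict.empty =
      csTab (csKeysO L) (fun a => csTab (csKeysI L a) (fun b => (L.count (a, b) : Int))) := by
  induction L using List.reverseRecOn with
  | nil => rfl
  | append_singleton L p IH =>
    obtain ⟨a, b⟩ := p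
    have hO : (csKeysO L).Nodup := PySem.Set.nodup_ofList _
    have hI : ∀ a' : String, (csKeysI L a').Nodup := fun a' => PySem.Set.nodup_ofList _
    have h1 : csApply (L ++ [(a, b)]) PySem.Dict.empty
        = csBump (csApply L PySem.Dict.empty) a b := by
      simp [csApply, List.foldl_append]
    rw [h1, IH]
    simp only [csBump]
    have hm : (csTab (csKeysO L) (fun a' => csTab (csKeysI L a')
          (fun b' => (L.count (a', b') : Int)))).getD a PySem.Dict.empty
        = csTab (csKeysI L a) (fun b' => (L.count (a, b') : Int)) := by
      rw [cs_tab_getD _ _ _ _ hO]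
      split_ifs with h
      · rfl
      · rw [cs_keysI_nil_of_not_memO L a h]; rfl
    rw [hm]
    have hg : (csTab (csKeysI L a) (fun b' => (L.count (a, b') : Int))).getD b 0
        = (L.count (a, b) : Int) := by
      rw [cs_tab_getD _ _ _ _ (hI a)]
      split_ifs with h
      · rfl
      · rw [cs_count_zero_of_not_memI L a b h]; simp
    rw [hg]
    have hcnt_self : (L ++ [(a, b)]).count (a, b) = L.count (a, b) + 1 := by
      simp [List.count_append]
    have hcnt_ne : ∀ a' b' : String, (a', b') ≠ (a, b) →
        (L ++ [(a, b)]).count (a', b') = L.count (a', b') := by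
      intro a' b' hne
      have h0 : List.count (a', b') [(a, b)] = 0 := by
        rw [List.count_eq_zero]; simpa using hne
      rw [List.count_append, h0, Nat.add_zero]
    have hins : (csTab (csKeysI L a) (fun b' => (L.count (a, b') : Int))).insert b
          ((L.count (a, b) : Int) + 1)
        = csTab (csKeysI (L ++ [(a, b)]) a)
            (fun b' => ((L ++ [(a, b)]).count (a, b') : Int)) := by
      rw [cs_keysI_append, if_pos rfl]
      refine cs_tab_insert _ _ _ _ _ ?_ ?_
      · intro k hk hkb
        rw [hcnt_ne a k (by simp [hkb])]
      · rw [hcnt_self]; push_cast; ring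
    rw [hins]
    conv_rhs => rw [cs_keysO_append]
    refine cs_tab_insert _ _ _ _ _ ?_ ?_
    · intro k hk hka
      rw [cs_keysI_append, if_neg hka]
      congr 1
      funext b'
      rw [hcnt_ne k b' (by simp [hka])]
    · rfl

lemma cs_range_tails {α β : Type} (σ : β → α → List α → β) (xs : List α) (d : α) :
    ∀ (n k : Nat), xs.length - k = n → ∀ s : β,
      (PySem.List.pyRange (k : Int) (PySem.List.len xs) 1).foldl
        (fun s i => σ s (PySem.List.pyGetD xs i d) (xs.drop (i.toNat + 1))) s
      = tailsFold σ (xs.drop k) s := by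
  intro n
  induction n with
  | zero =>
    intro k hk s
    have hk' : xs.length ≤ k := by omega
    have hr : PySem.List.pyRange (k : Int) (PySem.List.len xs) 1 = [] := by
      rw [PySem.List.len_eq]
      apply List.eq_nil_iff_forall_not_mem.2
      intro x hx
      have := PySem.List.mem_pyRange_one.1 hx
      omega
    rw [hr, List.drop_eq_nil_of_le hk']
    rfl
  | succ n IH =>
    intro k hk s
    have hklt : k < xs.length := by omega
    rw [PySem.List.len_eq, PySem.List.pyRange_one_cons (by exact_mod_cast hklt),
      List.foldl_cons]
    have hget : PySem.List.pyGetD xs (k : Int) d = xs[k] := by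
      rw [PySem.List.pyGetD_natCast]
      exact List.getD_eq_getElem _ _ hklt
    simp only [hget, Int.toNat_natCast]
    have hcast : (k : Int) + 1 = ((k + 1 : Nat) : Int) := by push_cast; ring
    rw [hcast, ← PySem.List.len_eq,
      IH (k + 1) (by omega) (σ s xs[k] (xs.drop (k + 1)))]
    rw [List.drop_eq_getElem_cons hklt]
    rfl

lemma cs_tailsFold_const {α β : Type} (F : β → α → β) (xs : List α) (s : β) :
    tailsFold (fun s y _ => F s y) xs s = xs.foldl F s := by
  induction xs generalizing s with
  | nil => rfl
  | cons y r IH => simp [tailsFold, IH]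

lemma cs_flat_bump (e : String) :
    ∀ (r : List String) (co : PySem.Dict String (PySem.Dict String Int)),
      r.foldl (fun co x => csBump (csBump co e x) x e) co
        = csApply (r.flatMap fun x => [(e, x), (x, e)]) co := by
  intro r
  induction r with
  | nil => intro co; rfl
  | cons x r IH =>
    intro co
    simp only [List.flatMap_cons, List.cons_append, List.nil_append, csApply,
      List.foldl_cons]
    exact IH _

def csSig (co : PySem.Dict String (PySem.Dict String Int)) (e : String) (r : List String) :
    PySem.Dict String (PySem.Dict String Int) :=
  r.foldl (fun co x => csBump (csBump co e x) x e) co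

lemma cs_tails_instr : ∀ (xs : List String) (s : PySem.Dict String (PySem.Dict String Int)),
    tailsFold csSig xs s = csApply (csInstr xs) s := by
  intro xs
  induction xs with
  | nil => intro s; rfl
  | cons e r IH =>
    intro s
    show tailsFold csSig r (csSig s e r) = csApply (csInstr (e :: r)) s
    rw [IH, show csSig s e r = csApply (r.flatMap fun x => [(e, x), (x, e)]) s from
      cs_flat_bump e r s]
    show _ = csApply ((r.flatMap fun x => [(e, x), (x, e)]) ++ csInstr r) s
    simp [csApply, List.foldl_append]

lemma cs_A_fold (l : List (String × String)) :
    (PySem.List.pyRange 0 (PySem.List.len l) 1).foldl (fun co i =>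
      (PySem.List.pyRange (i + 1) (PySem.List.len l) 1).foldl (fun co j =>
        csBump (csBump co (PySem.List.pyGetD l i ("", "")).2 (PySem.List.pyGetD l j ("", "")).2)
          (PySem.List.pyGetD l j ("", "")).2 (PySem.List.pyGetD l i ("", "")).2) co)
      PySem.Dict.empty
    = csApply (csInstr (l.map fun p => p.2)) PySem.Dict.empty := by
  have hmap : ∀ j : Int, (PySem.List.pyGetD l j ("", "")).2
      = PySem.List.pyGetD (l.map fun p => p.2) j "" :=
    fun j => (PySem.List.pyGetD_map (fun p : String × String => p.2) l j ("", "")).symm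
  have hlen : PySem.List.len l = PySem.List.len (l.map fun p => p.2) := by
    simp [PySem.List.len_eq]
  simp only [hmap, hlen]
  rw [show (0 : Int) = ((0 : Nat) : Int) by norm_num]
  rw [PySem.List.foldl_congr_mem _ _
    (fun co i => csSig co (PySem.List.pyGetD (l.map fun p => p.2) i "")
      ((l.map fun p => p.2).drop (i.toNat + 1))) _ ?hb]
  · rw [cs_range_tails csSig (l.map fun p => p.2) "" (l.map fun p => p.2).length 0
      (by omega) PySem.Dict.empty, List.drop_zero, cs_tails_instr]
  case hb =>
    intro co i hi
    obtain ⟨h0, hlt⟩ := PySem.List.mem_pyRange_one.1 hi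
    obtain ⟨k, rfl⟩ : ∃ k : Nat, i = (k : Int) := ⟨i.toNat, (Int.toNat_of_nonneg h0).symm⟩
    have hcast : (k : Int) + 1 = ((k + 1 : Nat) : Int) := by push_cast; ring
    rw [hcast]
    calc (PySem.List.pyRange ((k + 1 : Nat) : Int) (PySem.List.len (l.map fun p => p.2)) 1).foldl
          (fun co j => csBump (csBump co (PySem.List.pyGetD (l.map fun p => p.2) (k : Int) "")
              (PySem.List.pyGetD (l.map fun p => p.2) j ""))
            (PySem.List.pyGetD (l.map fun p => p.2) j "")
            (PySem.List.pyGetD (l.map fun p => p.2) (k : Int) "")) co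
        = tailsFold (fun s y _ => csBump (csBump s (PySem.List.pyGetD (l.map fun p => p.2) (k : Int) "") y)
            y (PySem.List.pyGetD (l.map fun p => p.2) (k : Int) "")) ((l.map fun p => p.2).drop (k + 1)) co :=
          cs_range_tails (fun s y _ => csBump (csBump s
              (PySem.List.pyGetD (l.map fun p => p.2) (k : Int) "") y) y
              (PySem.List.pyGetD (l.map fun p => p.2) (k : Int) ""))
            (l.map fun p => p.2) "" ((l.map fun p => p.2).length - (k + 1)) (k + 1) rfl co
      _ = ((l.map fun p => p.2).drop (k + 1)).foldl
            (fun s y => csBump (csBump s (PySem.List.pyGetD (l.map fun p => p.2) (k : Int) "") y)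
              y (PySem.List.pyGetD (l.map fun p => p.2) (k : Int) "")) co := cs_tailsFold_const _ _ _
      _ = csSig co (PySem.List.pyGetD (l.map fun p => p.2) (k : Int) "")
            ((l.map fun p => p.2).drop (((k : Int)).toNat + 1)) := by
          rw [Int.toNat_natCast]; rfl

lemma cs_A_eq_apply (l : List (String × String)) :
    cooccurrence_score l =
      (csApply (csInstr (l.map (fun p => p.2))) PySem.Dict.empty).items.map
        (fun p => (p.1, p.2.items)) := by
  simp only [cooccurrence_score]
  rw [cs_A_fold]

lemma cs_flat_count (e a b : String) : ∀ r : List String,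
    ((r.flatMap fun x => [(e, x), (x, e)]).count (a, b))
      = (if e = a then r.count b else 0) + (if e = b then r.count a else 0) := by
  intro r
  induction r with
  | nil => simp
  | cons x r IH =>
    simp only [List.flatMap_cons, List.cons_append, List.nil_append, List.count_cons, IH,
      beq_iff_eq, Prod.mk.injEq]
    by_cases hab : a = b
    · subst hab
      by_cases hea : e = a <;> by_cases hxa : x = a <;>
        (first
          | (simp [hea, hxa]; omega)
          | simp [hea, hxa])
    · split_ifs <;> (first | omega | simp_all)

lemma cs_instr_count (a b : String) : ∀ xs : List String,
    (csInstr xs).count (a, b) = xs.count a * xs.count b - (if a = b then xs.count a else 0) := by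
  intro xs
  induction xs with
  | nil => simp [csInstr]
  | cons e r IH =>
    simp only [csInstr, List.count_append, cs_flat_count, IH, List.count_cons, beq_iff_eq]
    by_cases hab : a = b
    · subst hab
      by_cases hea : e = a
      · subst hea
        simp
        have h1 : List.count e r ≤ List.count e r * List.count e r := by nlinarith
        have h2 : (List.count e r + 1) * (List.count e r + 1)
            = List.count e r * List.count e r + List.count e r + List.count e r + 1 := by ring
        omega
      · simp [hea]
    · by_cases hea : e = a
      · by_cases heb : e = b
        · exact absurd (hea.symm.trans heb) hab
        · simp [hea, hab]
          ring
      · by_cases heb : e = b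
        · simp [heb, hab]
          rw [if_neg (fun h => hab h.symm), if_neg (fun h => hab h.symm)]
          ring
        · simp [hea, heb, hab]

lemma cs_mem_instr : ∀ (xs : List String) (p : String × String),
    p ∈ csInstr xs → p.1 ∈ xs ∧ p.2 ∈ xs := by
  intro xs
  induction xs with
  | nil => intro p hp; cases hp
  | cons e r IH =>
    intro p hp
    rcases List.mem_append.1 hp with h | h
    · obtain ⟨x, hx, hpx⟩ := List.mem_flatMap.1 h
      have hpx' : p = (e, x) ∨ p = (x, e) := by simpa using hpx
      rcases hpx' with h1 | h1 <;> subst h1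
      · exact ⟨List.mem_cons_self .., List.mem_cons_of_mem _ hx⟩
      · exact ⟨List.mem_cons_of_mem _ hx, List.mem_cons_self ..⟩
    · obtain ⟨h1, h2⟩ := IH p h
      exact ⟨List.mem_cons_of_mem _ h1, List.mem_cons_of_mem _ h2⟩

lemma cs_update_absorb (S : PySem.Set String) (J : List String)
    (h : ∀ y ∈ J, y ∈ S) : PySem.Set.update S J = S := by
  rw [PySem.Set.update_eq_append_filter]
  have hf : List.filter (fun y => !S.contains y) (PySem.Set.ofList J) = [] := by
    rw [List.filter_eq_nil_iff]
    intro y hy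
    have hmem : y ∈ S := h y ((PySem.Set.mem_ofList _ _).1 hy)
    simp [(PySem.Set.contains_iff _ _).2 hmem]
    try exact hmem
  rw [hf, List.append_nil]

lemma cs_foldl_add_pairhead (e : String) :
    ∀ (r : List String) (s : PySem.Set String), e ∈ s →
      List.foldl PySem.Set.add s (r.flatMap fun x => [e, x]) = List.foldl PySem.Set.add s r := by
  intro r
  induction r with
  | nil => intro s hs; rfl
  | cons x r IH =>
    intro s hs
    simp only [List.flatMap_cons, List.cons_append, List.nil_append, List.foldl_cons]
    rw [PySem.Set.add_of_mem hs]
    exact IH _ ((PySem.Set.mem_add _ _ _).2 (Or.inl hs))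

lemma cs_keysO_instr (xs : List String) (h : 2 ≤ xs.length) :
    csKeysO (csInstr xs) = PySem.Set.ofList xs := by
  match xs, h with
  | e :: x :: r, _ => ?_
  show csKeysO (((x :: r).flatMap fun y => [(e, y), (y, e)]) ++ csInstr (x :: r))
      = PySem.Set.ofList (e :: x :: r)
  have hmapfst : (((x :: r).flatMap fun y => [(e, y), (y, e)]) ++ csInstr (x :: r)).map Prod.fst
      = ((x :: r).flatMap fun y => [e, y]) ++ (csInstr (x :: r)).map Prod.fst := by
    simp [List.map_flatMap]
  show PySem.Set.ofList _ = _
  rw [hmapfst, PySem.Set.ofList_append]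
  have h1 : PySem.Set.ofList ((x :: r).flatMap fun y => [e, y])
      = PySem.Set.ofList (e :: x :: r) := by
    rw [PySem.Set.ofList_eq_foldl, PySem.Set.ofList_eq_foldl]
    simp only [List.flatMap_cons, List.cons_append, List.nil_append, List.foldl_cons]
    exact cs_foldl_add_pairhead e r _
      ((PySem.Set.mem_add _ _ _).2 (Or.inl ((PySem.Set.mem_add _ _ _).2 (Or.inr rfl))))
  rw [h1]
  apply cs_update_absorb
  intro y hy
  obtain ⟨p, hp, rfl⟩ := List.mem_map.1 hy
  exact (PySem.Set.mem_ofList _ _).2 (List.mem_cons_of_mem _ (cs_mem_instr _ p hp).1)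

lemma cs_foldl_add_dupself (a : String) :
    ∀ (r : List String) (s : PySem.Set String),
      List.foldl PySem.Set.add s (r.flatMap fun x => [x] ++ (if x == a then [a] else []))
        = List.foldl PySem.Set.add s r := by
  intro r
  induction r with
  | nil => intro s; rfl
  | cons x r IH =>
    intro s
    by_cases hxa : x = a
    · subst hxa
      have step : List.foldl PySem.Set.add s
            ((x :: r).flatMap fun y => [y] ++ (if y == x then [x] else []))
          = List.foldl PySem.Set.add ((s.add x).add x)
            (r.flatMap fun y => [y] ++ (if y == x then [x] else [])) := by
        rw [List.flatMap_cons, if_pos (beq_self_eq_true x)]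
        rfl
      rw [step, PySem.Set.add_of_mem ((PySem.Set.mem_add _ _ _).2 (Or.inr rfl))]
      exact IH _
    · have hb : (x == a) = true → False := by simpa using hxa
      have step : List.foldl PySem.Set.add s
            ((x :: r).flatMap fun y => [y] ++ (if y == a then [a] else []))
          = List.foldl PySem.Set.add (s.add x)
            (r.flatMap fun y => [y] ++ (if y == a then [a] else [])) := by
        rw [List.flatMap_cons, if_neg hb]
        rfl
      rw [step]
      exact IH _

lemma cs_foldl_add_mate (a e : String) :
    ∀ (r : List String) (s : PySem.Set String),
      List.foldl PySem.Set.add s (r.flatMap fun x => if x == a then [e] else [])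
        = if a ∈ r then PySem.Set.add s e else s := by
  intro r
  induction r with
  | nil => intro s; simp
  | cons x r IH =>
    intro s
    by_cases hxa : x = a
    · subst hxa
      have step : List.foldl PySem.Set.add s
            ((x :: r).flatMap fun y => if y == x then [e] else [])
          = List.foldl PySem.Set.add (s.add e)
            (r.flatMap fun y => if y == x then [e] else []) := by
        rw [List.flatMap_cons, if_pos (beq_self_eq_true x)]
        rfl
      rw [step, IH, if_pos (List.mem_cons_self ..)]
      by_cases h : x ∈ r
      · rw [if_pos h, PySem.Set.add_of_mem ((PySem.Set.mem_add _ _ _).2 (Or.inr rfl))]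
      · rw [if_neg h]
    · have hb : (x == a) = true → False := by simpa using hxa
      have step : List.foldl PySem.Set.add s
            ((x :: r).flatMap fun y => if y == a then [e] else [])
          = List.foldl PySem.Set.add s
            (r.flatMap fun y => if y == a then [e] else []) := by
        rw [List.flatMap_cons, if_neg hb]
        rfl
      rw [step, IH]
      by_cases h : a ∈ r
      · rw [if_pos h, if_pos (List.mem_cons_of_mem _ h)]
      · rw [if_neg h, if_neg (by
          intro hc
          rcases List.mem_cons.1 hc with hh | hh
          · exact hxa hh.symm
          · exact h hh)]

lemma cs_flat_filter (e a : String) : ∀ r : List String,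
    (((r.flatMap fun x => [(e, x), (x, e)]).filter (fun p => p.1 == a)).map Prod.snd)
      = r.flatMap (fun x => (if e == a then [x] else []) ++ (if x == a then [e] else [])) := by
  intro r
  induction r with
  | nil => rfl
  | cons x r IH =>
    simp only [List.flatMap_cons]
    rw [List.filter_append, List.map_append, IH]
    congr 1
    by_cases hea : e = a <;> by_cases hxa : x = a <;>
      simp [List.filter_cons, hea, hxa]

lemma cs_keysI_instr : ∀ (xs : List String) (a : String), a ∈ xs →
    csKeysI (csInstr xs) a = PySem.Set.ofList (xs.erase a) := by
  intro xs
  induction xs with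
  | nil => intro a ha; cases ha
  | cons e r IH =>
    intro a ha
    show PySem.Set.ofList (((((r.flatMap fun x => [(e, x), (x, e)]) ++ csInstr r)).filter
        (fun p => p.1 == a)).map Prod.snd) = _
    rw [List.filter_append, List.map_append, PySem.Set.ofList_append, cs_flat_filter]
    by_cases hea : e = a
    · subst hea
      simp only [beq_self_eq_true, if_true]
      have h1 : PySem.Set.ofList (r.flatMap fun x => [x] ++ (if x == e then [e] else []))
          = PySem.Set.ofList r := by
        rw [PySem.Set.ofList_eq_foldl, PySem.Set.ofList_eq_foldl]
        exact cs_foldl_add_dupself e r []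
      rw [h1, List.erase_cons_head]
      apply cs_update_absorb
      intro y hy
      obtain ⟨p, hp, rfl⟩ := List.mem_map.1 hy
      exact (PySem.Set.mem_ofList _ _).2 (cs_mem_instr _ p (List.mem_of_mem_filter hp)).2
    · have ha' : a ∈ r := by
        rcases List.mem_cons.1 ha with h | h
        · exact absurd h.symm hea
        · exact h
      have hbea : (e == a) = false := by simpa using hea
      simp only [hbea, Bool.false_eq_true, if_false, List.nil_append]
      have h1 : PySem.Set.ofList (r.flatMap fun x => if x == a then [e] else [])
          = [e] := by
        rw [PySem.Set.ofList_eq_foldl]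
        rw [cs_foldl_add_mate a e r [], if_pos ha']
        rfl
      rw [h1, PySem.Set.update_eq_append_filter]
      have h2 : csKeysI (csInstr r) a = PySem.Set.ofList (r.erase a) := IH a ha'
      rw [show PySem.Set.ofList ((List.filter (fun p => p.1 == a) (csInstr r)).map Prod.snd)
          = csKeysI (csInstr r) a from rfl, h2]
      rw [List.erase_cons, if_neg (by simpa using hea), PySem.Set.ofList_cons]
      have h3 : List.filter (fun y => !PySem.Set.contains [e] y) (PySem.Set.ofList (r.erase a))
          = PySem.Set.discard (PySem.Set.ofList (r.erase a)) e := by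
        apply List.filter_congr
        intro y hy
        by_cases h : y = e <;> simp [h, PySem.Set.contains]
      rw [h3]
      rfl

lemma cs_val_eq (xs : List String) (a b : String) :
    ((xs.count a * xs.count b - (if a = b then xs.count a else 0) : Nat) : Int)
      = (xs.count a : Int) * ((xs.count b : Int) - (if b == a then 1 else 0)) := by
  by_cases h : a = b
  · subst h
    have h1 : xs.count a ≤ xs.count a * xs.count a := by nlinarith
    simp only [if_pos rfl, beq_self_eq_true]
    push_cast [h1]
    ring
  · have hba : (b == a) = false := by simpa using fun hh => h hh.symm
    simp only [if_neg h, hba, Bool.false_eq_true, if_false]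
    rw [Nat.sub_zero]
    push_cast
    ring

lemma cs_inner_fold {ν : Type} (v : String → ν) :
    ∀ (R S : List String), S.Nodup →
      R.foldl (fun d b => if d.contains b then d else d.insert b (v b)) (csTab S v)
        = csTab (PySem.Set.update S R) v := by
  intro R
  induction R with
  | nil => intro S hS; rfl
  | cons b R IH =>
    intro S hS
    simp only [List.foldl_cons]
    rw [cs_tab_contains]
    by_cases hb : b ∈ S
    · rw [if_pos (decide_eq_true hb), PySem.Set.update_cons, PySem.Set.add_of_mem hb]
      exact IH S hS
    · rw [if_neg (by simp [hb]),
        cs_tab_insert S v v b (v b) (fun k _ _ => rfl) rfl, PySem.Set.update_cons]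
      exact IH (PySem.Set.add S b) (PySem.Set.nodup_add S b hS)

lemma cs_outer_fold (xs : List String) (v : String → String → Int) :
    ∀ (suf pre : List String), xs = pre ++ suf →
      (PySem.List.enumerate suf (pre.length : Int)).foldl
        (fun r (p : Int × String) =>
          if r.contains p.2 then r else
          r.insert p.2 ((PySem.List.slice xs none (some p.1) ++
              PySem.List.slice xs (some (p.1 + 1)) none).foldl
            (fun inn b => if inn.contains b then inn else inn.insert b (v p.2 b))
            PySem.Dict.empty))
        (csTab (PySem.Set.ofList pre) (fun a => csTab (PySem.Set.ofList (xs.erase a)) (v a)))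
      = csTab (PySem.Set.update (PySem.Set.ofList pre) suf)
          (fun a => csTab (PySem.Set.ofList (xs.erase a)) (v a)) := by
  intro suf
  induction suf with
  | nil =>
    intro pre hxs
    rfl
  | cons x suf IH =>
    intro pre hxs
    rw [PySem.List.enumerate_cons, List.foldl_cons]
    simp only []
    rw [cs_tab_contains]
    by_cases hx : x ∈ PySem.Set.ofList pre
    · rw [if_pos (decide_eq_true hx)]
      have IH' := IH (pre ++ [x]) (by rw [hxs, List.append_assoc]; rfl)
      rw [PySem.Set.ofList_append_singleton, PySem.Set.add_of_mem hx] at IH'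
      have hidx : ((pre ++ [x]).length : Int) = (pre.length : Int) + 1 := by
        simp
      rw [hidx] at IH'
      rw [IH', PySem.Set.update_cons, PySem.Set.add_of_mem hx]
    · rw [if_neg (by simp [hx])]
      have hxpre : x ∉ pre := fun hc => hx ((PySem.Set.mem_ofList _ _).2 hc)
      have htake : PySem.List.slice xs none (some (pre.length : Int)) = pre := by
        rw [PySem.List.slice_to_natCast, hxs]
        exact List.take_left
      have hdrop : PySem.List.slice xs (some ((pre.length : Int) + 1)) none = suf := by
        have hc : ((pre.length : Int) + 1) = (((pre ++ [x]).length : Nat) : Int) := by simp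
        rw [hc, PySem.List.slice_from_natCast, hxs,
          show pre ++ x :: suf = (pre ++ [x]) ++ suf by simp]
        exact List.drop_left
      rw [htake, hdrop]
      have herase : xs.erase x = pre ++ suf := by
        rw [hxs, List.erase_append_right _ hxpre, List.erase_cons_head]
      have hinner : (pre ++ suf).foldl
            (fun inn b => if inn.contains b then inn else inn.insert b (v x b))
            PySem.Dict.empty
          = csTab (PySem.Set.ofList (xs.erase x)) (v x) := by
        have h0 := cs_inner_fold (v x) (pre ++ suf) [] List.nodup_nil
        rw [PySem.Set.update_nil_left] at h0
        rw [herase]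
        exact h0
      rw [cs_tab_insert (PySem.Set.ofList pre) _ _ x _ (fun k _ _ => rfl) hinner]
      have IH' := IH (pre ++ [x]) (by rw [hxs, List.append_assoc]; rfl)
      rw [PySem.Set.ofList_append_singleton] at IH'
      have hidx : ((pre ++ [x]).length : Int) = (pre.length : Int) + 1 := by simp
      rw [hidx] at IH'
      rw [IH', PySem.Set.update_cons]

lemma cs_alt_closed (l : List (String × String)) (h : 2 ≤ (l.map (fun p => p.2)).length) :
    cooccurrence_score_alt l =
      (PySem.Set.ofList (l.map (fun p => p.2))).map (fun a =>
        (a, (PySem.Set.ofList ((l.map (fun p => p.2)).erase a)).map (fun b =>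
          (b, ((l.map (fun p => p.2)).count a : Int) *
              (((l.map (fun p => p.2)).count b : Int) - (if b == a then 1 else 0)))))) := by
  have hlen : ¬ (PySem.List.len (l.map (fun p => p.2)) < 2) := by
    rw [PySem.List.len_eq]
    omega
  simp only [cooccurrence_score_alt, if_neg hlen,
    PySem.Dict.foldl_insert_getD_add_one_eq_counter, PySem.Dict.getD_counter]
  have houter := cs_outer_fold (l.map (fun p => p.2))
    (fun a b => (List.count a (l.map (fun p => p.2)) : Int) *
      ((List.count b (l.map (fun p => p.2)) : Int) - (if b == a then 1 else 0)))
    (l.map (fun p => p.2)) [] rfl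
  simp only [List.length_nil, Nat.cast_zero] at houter
  rw [show PySem.Set.ofList ([] : List String) = ([] : List String) from rfl,
    PySem.Set.update_nil_left] at houter
  rw [show (csTab ([] : List String) (fun a =>
      csTab (PySem.Set.ofList ((l.map (fun p => p.2)).erase a))
        (fun b => (List.count a (l.map (fun p => p.2)) : Int) *
          ((List.count b (l.map (fun p => p.2)) : Int) - (if b == a then 1 else 0)))))
      = PySem.Dict.empty from rfl] at houter
  rw [houter, cs_tab_items, List.map_map]
  apply List.map_congr_left
  intro a _
  simp only [Function.comp_apply, cs_tab_items]

lemma cs_instr_short (xs : List String) (h : xs.length < 2) : csInstr xs = [] := by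
  match xs, h with
  | [], _ => rfl
  | [x], _ => rfl

-- ===== VERDICT (by name: the statement is the Claim_ definition above) =====
theorem cooccurrence_score_spec : Claim_equal_cooccurrence_score := by
  intro l _dom
  unfold Spec_cooccurrence_score
  rw [cs_A_eq_apply, cs_apply_closed]
  by_cases hlen : 2 ≤ (l.map (fun p => p.2)).length
  · rw [cs_alt_closed l hlen, cs_tab_items, List.map_map, cs_keysO_instr _ hlen]
    apply List.map_congr_left
    intro a ha
    have haents : a ∈ l.map (fun p => p.2) := (PySem.Set.mem_ofList _ _).1 ha
    simp only [Function.comp_apply, cs_tab_items, Prod.mk.injEq, true_and]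
    rw [cs_keysI_instr _ a haents]
    apply List.map_congr_left
    intro b _
    rw [cs_instr_count, cs_val_eq]
  · have h2 : (l.map (fun p => p.2)).length < 2 := by omega
    rw [cs_instr_short _ h2]
    have hshort : PySem.List.len ((l.map (fun p => p.2))) < 2 := by
      rw [PySem.List.len_eq]
      exact_mod_cast h2
    simp only [cooccurrence_score_alt, if_pos hshort]
    rfl
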